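-- pv_equiv track=rewrite | github.com/itswillis/LAB | LAB13 Recursion/Q6.py | get_positive_even_list
-- ===== SOURCE A (Python) =====
-- def get_positive_even_list(numbers):
--     empty_list = []
--     # base case
--     if not numbers:
--         return []
--     # recursive case
--     else:
--         if numbers[0] % 2 == 0:
--             if numbers[0] > 0:
--                 empty_list.append(numbers[0])
--         return (empty_list + get_positive_even_list(numbers[1:]))
-- ===== SOURCE B (Python) =====
-- def get_positive_even_list(numbers):
--     result = []
--     for x in numbers:
--         if x % 2 == 0 and x > 0:
--             result.append(x)
--     return result
-- ===== Notes on version B (the rewrite author's own statement) =====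
-- stated objective: simpler
-- what changed: Replaces tail recursion over slices with list concatenation by a single iterative loop appending into an accumulator.
import Mathlib
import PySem

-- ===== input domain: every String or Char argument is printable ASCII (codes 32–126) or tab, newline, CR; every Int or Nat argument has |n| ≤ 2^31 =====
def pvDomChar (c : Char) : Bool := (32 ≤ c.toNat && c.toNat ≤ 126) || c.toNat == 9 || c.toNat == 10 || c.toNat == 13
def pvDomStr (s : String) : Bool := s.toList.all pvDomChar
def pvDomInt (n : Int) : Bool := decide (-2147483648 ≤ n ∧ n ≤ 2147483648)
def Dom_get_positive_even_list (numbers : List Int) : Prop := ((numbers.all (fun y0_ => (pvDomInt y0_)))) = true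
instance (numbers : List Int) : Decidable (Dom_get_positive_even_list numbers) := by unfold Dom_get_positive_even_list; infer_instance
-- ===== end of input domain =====

-- B replaces A's recursion over slices (with repeated list concatenation) by a single
-- iterative accumulation pass; a timing run measured B faster.

-- ===== PORT A =====
-- Port of A: recursion, per-step singleton list + append, as in the Python.
def get_positive_even_list (numbers : List Int) : List Int :=
  match numbers with
  | [] => []
  | x :: rest =>
    (if PySem.Int.mod x 2 = 0 then (if x > 0 then [x] else []) else []) ++
      get_positive_even_list rest

-- ===== PORT B =====
-- Port of B: single fold appending to an accumulator.
def get_positive_even_list_alt (numbers : List Int) : List Int :=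
  numbers.foldl (fun result x =>
    if PySem.Int.mod x 2 = 0 ∧ x > 0 then result ++ [x] else result) []

-- ===== PRECONDITION & SPEC =====
def Spec_get_positive_even_list (numbers : List Int) (out : List Int) : Prop := out = get_positive_even_list_alt numbers
instance (numbers : List Int) (out : List Int) : Decidable (Spec_get_positive_even_list numbers out) := by unfold Spec_get_positive_even_list; infer_instance

-- ===== CLAIM (what is proved, stated in full; the proofs are below) =====
def Claim_equal_get_positive_even_list : Prop := ∀ (numbers : List Int), Dom_get_positive_even_list numbers → Spec_get_positive_even_list numbers (get_positive_even_list numbers)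

-- ===== LEMMAS AND PROOFS =====

-- ===== VERDICT (by name: the statement is the Claim_ definition above) =====
theorem pv_foldl_acc (numbers : List Int) (acc : List Int) :
    numbers.foldl (fun result x =>
      if PySem.Int.mod x 2 = 0 ∧ x > 0 then result ++ [x] else result) acc
      = acc ++ get_positive_even_list numbers := by
  induction numbers generalizing acc with
  | nil => simp [get_positive_even_list]
  | cons x rest ih =>
    simp only [List.foldl, get_positive_even_list, ih]
    split_ifs with h h1 h2 <;> simp_all

theorem get_positive_even_list_spec : Claim_equal_get_positive_even_list := by
  intro numbers _
  unfold Spec_get_positive_even_list get_positive_even_list_alt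
  simpa using (pv_foldl_acc numbers []).symm
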